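-- pv_equiv track=rewrite | github.com/coolman-success/CodeSignalPractice | Arcade/The Core/11 - Spring of Integration/91 - Combs - 1.py | solution
-- ===== SOURCE A (Python) =====
-- def solution(comb1, comb2):
--     from itertools import zip_longest
--     b1 = ''.join(['0' if x == '.' else '1' for x in comb1])
--     b2 = ''.join(['0' if x == '.' else '1' for x in comb2])
--     b1 = '0' * len(b2) + b1
--     r = []
--     for i in range(len(b1)):
--         x = b1[:i]
--         for a, b in zip_longest(b1[i:], b2, fillvalue='0'):
--             x += str(int(a) + int(b))
--         if not '2' in x:
--             r.append(x.strip('0'))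
--     return len(sorted(r, key=len)[0])
-- ===== SOURCE B (Python) =====
-- def solution(comb1, comb2):
--     # Bitmask re-implementation: combs become integers (bit j = tooth at
--     # position j), each relative shift is tested with one bitwise AND, and the
--     # merged length is read off the stripped-odd mask's bit length.
--     t1 = 0
--     for c in reversed(comb1):
--         t1 = 2 * t1 + (c != '.')
--     t2 = 0
--     for c in reversed(comb2):
--         t2 = 2 * t2 + (c != '.')
--     base = t1 << len(comb2)
--     spans = []
--     for i in range(len(comb1) + len(comb2)):
--         moved = t2 << i
--         if base & moved:
--             continue
--         u = base | moved
--         if u == 0: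
--             spans.append(0)
--         else:
--             while u % 2 == 0:
--                 u //= 2
--             spans.append(u.bit_length())
--     return min(spans)
-- ===== Notes on version B (the rewrite author's own statement) =====
-- stated objective: faster
-- what changed: Replaces per-shift digit-string construction, substring search for '2' and strip('0') with integer bitmasks: each shift is tested with one bitwise AND and the merged length is read from the OR-mask after dropping trailing zero bits, so no strings are built in the loop.
import Mathlib
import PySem

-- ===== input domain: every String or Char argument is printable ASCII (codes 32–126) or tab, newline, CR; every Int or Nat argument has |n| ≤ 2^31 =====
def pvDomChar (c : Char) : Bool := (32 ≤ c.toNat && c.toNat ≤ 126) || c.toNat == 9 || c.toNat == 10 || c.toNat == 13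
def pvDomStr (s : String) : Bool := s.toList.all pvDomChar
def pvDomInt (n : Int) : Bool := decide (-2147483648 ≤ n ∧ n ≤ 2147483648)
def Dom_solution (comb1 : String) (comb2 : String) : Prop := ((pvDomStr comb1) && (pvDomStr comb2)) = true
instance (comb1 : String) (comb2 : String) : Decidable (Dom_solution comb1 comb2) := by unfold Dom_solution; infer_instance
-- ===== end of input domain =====

-- B replaces A's per-shift digit-string building, '2'-search and strip('0') by integer
-- bitmasks (one AND per shift, merged length from the OR-mask's bit length): faster by a
-- large constant factor; equivalence of the RETURN value is proved on Pre_ below.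

-- ===== PORT A =====
-- itertools.zip_longest(as, bs, fillvalue=f) restricted to the two-list char form A uses
def zipLongest (as bs : List Char) (f : Char) : List (Char × Char) :=
  match as, bs with
  | [], [] => []
  | a :: as', [] => (a, f) :: zipLongest as' [] f
  | [], b :: bs' => (f, b) :: zipLongest [] bs' f
  | a :: as', b :: bs' => (a, b) :: zipLongest as' bs' f

-- int(c) for the one-character strings A feeds it (always '0' or '1', so getD never fires)
def pyIntCh (c : Char) : Int := (PySem.Int.ofChars? [c]).getD 0

def solution (comb1 : String) (comb2 : String) : Int :=
  let b1 := comb1.toList.map (fun x => if x = '.' then '0' else '1')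
  let b2 := comb2.toList.map (fun x => if x = '.' then '0' else '1')
  let b1 := List.replicate b2.length '0' ++ b1
  let r : List (List Char) :=
    (PySem.List.pyRange 0 (PySem.List.len b1) 1).foldl (fun r i =>
      let x := PySem.List.slice b1 none (some i)
      let x := (zipLongest (PySem.List.slice b1 (some i) none) b2 '0').foldl
        (fun x ab => x ++ PySem.Int.toChars (pyIntCh ab.1 + pyIntCh ab.2)) x
      if PySem.Chars.isIn ['2'] x then r else r ++ [PySem.Chars.stripChars x ['0']]) []
  -- sorted(r, key=len)[0]: the [0] raises IndexError iff r = [] (excluded by Pre_)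
  PySem.List.len
    (PySem.List.pyGetD (PySem.List.sorted r (fun s => PySem.List.len s) false) 0 [])

-- ===== PORT B =====
-- the 'while u % 2 == 0: u //= 2' loop of Source B (the u ≠ 0 test only makes it total;
-- Source B enters the loop with u != 0 and keeps it nonzero)
def oddify (u : Nat) : Nat :=
  if h : u ≠ 0 ∧ u % 2 = 0 then oddify (u / 2) else u
  termination_by u
  decreasing_by exact Nat.div_lt_self (Nat.pos_of_ne_zero h.1) (by omega)

def solution_alt (comb1 : String) (comb2 : String) : Int :=
  -- Python ints here are always nonnegative: kept as Nat
  let t1 : Nat := comb1.toList.reverse.foldl (fun t c => 2 * t + (if c ≠ '.' then 1 else 0)) 0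
  let t2 : Nat := comb2.toList.reverse.foldl (fun t c => 2 * t + (if c ≠ '.' then 1 else 0)) 0
  let base := t1 <<< comb2.toList.length
  let spans : List Int :=
    (PySem.List.pyRange 0 (PySem.List.len comb1.toList + PySem.List.len comb2.toList) 1).foldl
      (fun spans i =>
        let moved := t2 <<< i.toNat   -- i runs over nonnegative ints
        if base &&& moved ≠ 0 then spans
        else
          let u := base ||| moved
          if u = 0 then spans ++ [(0 : Int)]
          else spans ++ [(PySem.Int.bitLength ((oddify u : Nat) : Int) : Int)]) []
  -- min(spans): raises ValueError iff spans = [] (excluded by Pre_)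
  (PySem.List.min? spans (fun v => v)).getD 0

-- ===== PRECONDITION & SPEC =====
-- Pre_ excludes only the input where BOTH combs are empty: there A's sorted(r)[0] raises
-- IndexError (and B's min([]) raises ValueError).
def Pre_solution (comb1 : String) (comb2 : String) : Prop := ¬(comb1 = "" ∧ comb2 = "")
instance (comb1 : String) (comb2 : String) : Decidable (Pre_solution comb1 comb2) := by
  unfold Pre_solution; infer_instance
def pvWitness_solution : String × String := ("*..*", "*.*")

def Spec_solution (comb1 : String) (comb2 : String) (out : Int) : Prop := out = solution_alt comb1 comb2
instance (comb1 : String) (comb2 : String) (out : Int) : Decidable (Spec_solution comb1 comb2 out) := by unfold Spec_solution; infer_instance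

-- ===== CLAIM (what is proved, stated in full; the proofs are below) =====
def Claim_equal_solution : Prop := ∀ (comb1 : String) (comb2 : String), Dom_solution comb1 comb2 → Pre_solution comb1 comb2 → Spec_solution comb1 comb2 (solution comb1 comb2)

-- ===== LEMMAS AND PROOFS =====

-- value of a binary digit string, low bit first
def mchars (x : List Char) : Nat :=
  x.foldr (fun c u => 2 * u + (if c = '1' then 1 else 0)) 0

-- the character A's inner loop appends for a pair of binary digit chars
def sc (a b : Char) : Char :=
  if a = '1' then (if b = '1' then '2' else '1') else (if b = '1' then '1' else '0')

def BinL (x : List Char) : Prop := ∀ c ∈ x, c = '0' ∨ c = '1'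

theorem mchars_cons (c : Char) (x : List Char) :
    mchars (c :: x) = 2 * mchars x + (if c = '1' then 1 else 0) := rfl

theorem testBit_mchars (x : List Char) (j : Nat) :
    (mchars x).testBit j = (x.getD j '0' == '1') := by
  induction x generalizing j with
  | nil => simp [mchars]
  | cons c t ih =>
    cases j with
    | zero =>
      rw [mchars_cons, Nat.testBit_zero]
      by_cases h : c = '1' <;> simp [h] <;> omega
    | succ j =>
      rw [mchars_cons, Nat.testBit_succ]
      have : (2 * mchars t + (if c = '1' then 1 else 0)) / 2 = mchars t := by
        by_cases h : c = '1' <;> simp [h] <;> omega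
      rw [this, ih]
      simp [List.getD]

theorem mchars_map_teeth (c : List Char) :
    mchars (c.map (fun x => if x = '.' then '0' else '1')) =
      c.reverse.foldl (fun t c => 2 * t + (if c ≠ '.' then 1 else 0)) 0 := by
  rw [List.foldl_reverse]
  induction c with
  | nil => rfl
  | cons a t ih =>
    simp only [List.map_cons, List.foldr_cons, mchars_cons, ih]
    by_cases h : a = '.' <;> simp [h]

-- oddify of an odd number / of a double
theorem oddify_eq_self (u : Nat) (h : u % 2 = 1) : oddify u = u := by
  rw [oddify]; simp [h]

theorem oddify_double (u : Nat) (h : u ≠ 0) : oddify (2 * u) = oddify u := by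
  rw [oddify]
  have h2 : 2 * u ≠ 0 := by omega
  simp [h2, Nat.mul_mod_right, Nat.mul_div_cancel_left u (by norm_num : 0 < 2)]

-- bit_length facts via PySem's halving lemma
theorem bl_zero : PySem.Int.bitLength ((0 : Nat) : Int) = 0 := by decide

theorem bl_step (m : Nat) (h : 0 < m) :
    PySem.Int.bitLength ((m : Nat) : Int) = PySem.Int.bitLength ((m / 2 : Nat) : Int) + 1 :=
  PySem.Int.bitLength_natCast h

theorem bl_eq_zero_iff (m : Nat) : PySem.Int.bitLength ((m : Nat) : Int) = 0 ↔ m = 0 := by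
  constructor
  · intro h
    by_contra hm
    rw [bl_step m (Nat.pos_of_ne_zero hm)] at h
    omega
  · intro h; subst h; exact bl_zero

-- dropping trailing zeros: length of rstrip = bit length
theorem rstrip_len (x : List Char) (hb : BinL x) :
    (x.reverse.dropWhile (fun c => ['0'].contains c)).length
      = PySem.Int.bitLength ((mchars x : Nat) : Int) := by
  induction x with
  | nil => simpa using bl_zero.symm
  | cons c t ih =>
    have hbt : BinL t := fun d hd => hb d (List.mem_cons_of_mem _ hd)
    have hc := hb c List.mem_cons_self
    have ih' := ih hbt
    rw [List.reverse_cons, List.dropWhile_append, mchars_cons]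
    by_cases he : (t.reverse.dropWhile (fun c => ['0'].contains c)).isEmpty
    · -- trailing part of t is all zeros ⇒ mchars t = 0
      have hm0 : mchars t = 0 := by
        rw [List.isEmpty_iff] at he
        rw [he] at ih'
        exact (bl_eq_zero_iff _).mp ih'.symm
      rw [if_pos he, hm0]
      rcases hc with h0 | h1
      · subst h0
        simpa [List.dropWhile] using bl_zero.symm
      · subst h1
        show (List.dropWhile (fun c => ['0'].contains c) ['1']).length
              = PySem.Int.bitLength ((2 * 0 + if ('1':Char) = '1' then 1 else 0 : Nat) : Int)
        decide
    · have hlen : (t.reverse.dropWhile (fun c => ['0'].contains c)).length ≠ 0 := by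
        intro h
        exact he (by rw [List.isEmpty_iff, ← List.length_eq_zero_iff]; exact h)
      have hm : mchars t ≠ 0 := by
        intro h
        rw [ih'] at hlen
        exact hlen (by rw [h]; exact bl_zero)
      rw [if_neg he, List.length_append]
      have hpos : 0 < 2 * mchars t + (if c = '1' then 1 else 0) := by
        have := Nat.pos_of_ne_zero hm; split <;> omega
      rw [bl_step _ hpos]
      have hdiv : (2 * mchars t + (if c = '1' then 1 else 0)) / 2 = mchars t := by
        split <;> omega
      rw [hdiv, ← ih']
      simp

-- dropping leading zeros halves the value down to its odd part
theorem mchars_dropWhile (x : List Char) (hb : BinL x) (h : mchars x ≠ 0) :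
    mchars (x.dropWhile (fun c => ['0'].contains c)) = oddify (mchars x) := by
  induction x with
  | nil => simp [mchars] at h
  | cons c t ih =>
    have hbt : BinL t := fun d hd => hb d (List.mem_cons_of_mem _ hd)
    rcases hb c List.mem_cons_self with hc | hc
    · subst hc
      have hv : mchars ('0' :: t) = 2 * mchars t := by
        rw [mchars_cons]
        simp
      have hm : mchars t ≠ 0 := by
        intro h0; rw [hv, h0] at h; exact h rfl
      rw [List.dropWhile_cons_of_pos (by decide), ih hbt hm, hv, oddify_double _ hm]
    · subst hc
      rw [List.dropWhile_cons_of_neg (by decide)]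
      refine (oddify_eq_self _ ?_).symm
      rw [mchars_cons]
      simp

theorem mchars_zero_dropWhile (x : List Char) (hb : BinL x) (h : mchars x = 0) :
    x.dropWhile (fun c => ['0'].contains c) = [] := by
  induction x with
  | nil => rfl
  | cons c t ih =>
    have hbt : BinL t := fun d hd => hb d (List.mem_cons_of_mem _ hd)
    rcases hb c List.mem_cons_self with hc | hc
    · subst hc
      rw [mchars_cons] at h
      rw [List.dropWhile_cons_of_pos (by decide)]
      exact ih hbt (by omega)
    · subst hc
      rw [mchars_cons] at h
      simp at h

theorem strip_len (x : List Char) (hb : BinL x) :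
    ((PySem.Chars.stripChars x ['0']).length : Int)
      = (if mchars x = 0 then (0 : Int)
         else (PySem.Int.bitLength ((oddify (mchars x) : Nat) : Int) : Int)) := by
  have hx' : BinL (x.dropWhile (fun c => ['0'].contains c)) := by
    intro c hc
    exact hb c ((List.dropWhile_sublist _).subset hc)
  have hlen := rstrip_len (x.dropWhile (fun c => ['0'].contains c)) hx'
  simp only [PySem.Chars.stripChars, List.length_reverse]
  by_cases h0 : mchars x = 0
  · rw [if_pos h0, mchars_zero_dropWhile x hb h0]
    simp [bl_zero]
  · rw [if_neg h0, hlen, mchars_dropWhile x hb h0]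

-- every natural is determined by its bits; nonzero ⇔ some bit set
theorem nat_ne_zero_iff (n : Nat) : n ≠ 0 ↔ ∃ j, n.testBit j = true := by
  constructor
  · intro h
    by_contra hno
    push_neg at hno
    exact h (Nat.eq_of_testBit_eq (fun i => by
      rw [Nat.zero_testBit]
      exact Bool.eq_false_iff.mpr (fun hb => (hno i) (by simpa using hb))))
  · rintro ⟨j, hj⟩ h0
    rw [h0, Nat.zero_testBit] at hj
    exact Bool.false_ne_true hj

-- generic getD helpers
theorem getD_map {α β : Type} (g : α → β) (l : List α) (k : Nat) (d : α) :
    (l.map g).getD k (g d) = g (l.getD k d) := by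
  simp only [List.getD_eq_getElem?_getD, List.getElem?_map]
  cases l[k]? <;> simp

theorem getD_drop (l : List Char) (i k : Nat) (d : Char) :
    (l.drop i).getD k d = l.getD (i + k) d := by
  simp [List.getD_eq_getElem?_getD, List.getElem?_drop]

theorem mem_iff_getD (l : List Char) (v d : Char) (h : v ≠ d) :
    v ∈ l ↔ ∃ j, l.getD j d = v := by
  constructor
  · intro hv
    rcases List.getElem_of_mem hv with ⟨j, hj, he⟩
    exact ⟨j, by rw [List.getD_eq_getElem?_getD, List.getElem?_eq_getElem hj]; exact he⟩
  · rintro ⟨j, hj⟩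
    by_cases hlt : j < l.length
    · rw [List.getD_eq_getElem?_getD, List.getElem?_eq_getElem hlt] at hj
      exact hj ▸ List.getElem_mem hlt
    · rw [List.getD_eq_getElem?_getD, List.getElem?_eq_none (by omega)] at hj
      exact absurd hj.symm h

theorem mem_imp_getD (l : List Char) (v d : Char) (hv : v ∈ l) :
    ∃ j, l.getD j d = v := by
  rcases List.getElem_of_mem hv with ⟨j, hj, he⟩
  exact ⟨j, by rw [List.getD_eq_getElem?_getD, List.getElem?_eq_getElem hj]; exact he⟩

-- zipLongest basics
theorem zipLongest_nil_left (bs : List Char) (f : Char) :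
    zipLongest [] bs f = bs.map (fun b => (f, b)) := by
  induction bs with
  | nil => rw [zipLongest]; simp
  | cons b t ih => rw [zipLongest, ih]; rfl

theorem zipLongest_nil_right (as : List Char) (f : Char) :
    zipLongest as [] f = as.map (fun a => (a, f)) := by
  induction as with
  | nil => rw [zipLongest]; simp
  | cons a t ih => rw [zipLongest, ih]; rfl

theorem getD_zipLongest (as bs : List Char) (f : Char) (k : Nat) :
    (zipLongest as bs f).getD k (f, f) = (as.getD k f, bs.getD k f) := by
  induction as generalizing bs k with
  | nil =>
    rw [zipLongest_nil_left]
    have h := getD_map (fun b => (f, b)) bs k f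
    simp only at h
    rw [h]
    simp [List.getD_eq_getElem?_getD]
  | cons a t ih =>
    cases bs with
    | nil =>
      rw [zipLongest_nil_right]
      have h := getD_map (fun a => (a, f)) (a :: t) k f
      simp only at h
      rw [h]
      simp [List.getD_eq_getElem?_getD]
    | cons b u =>
      rw [zipLongest]
      cases k with
      | zero => simp [List.getD_eq_getElem?_getD]
      | succ k => simpa [List.getD_eq_getElem?_getD] using ih u k

theorem mem_zipLongest (as bs : List Char) (f : Char) (ab : Char × Char)
    (h : ab ∈ zipLongest as bs f) :
    (ab.1 ∈ as ∨ ab.1 = f) ∧ (ab.2 ∈ bs ∨ ab.2 = f) := by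
  induction as generalizing bs with
  | nil =>
    rw [zipLongest_nil_left] at h
    rcases List.mem_map.mp h with ⟨b, hb, rfl⟩
    exact ⟨Or.inr rfl, Or.inl hb⟩
  | cons a t ih =>
    cases bs with
    | nil =>
      rw [zipLongest_nil_right] at h
      rcases List.mem_map.mp h with ⟨a', ha, rfl⟩
      exact ⟨Or.inl ha, Or.inr rfl⟩
    | cons b u =>
      rw [zipLongest] at h
      rcases List.mem_cons.mp h with rfl | h
      · exact ⟨Or.inl List.mem_cons_self, Or.inl List.mem_cons_self⟩
      · rcases ih u h with ⟨h1, h2⟩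
        refine ⟨?_, ?_⟩
        · rcases h1 with h1 | h1
          · exact Or.inl (List.mem_cons_of_mem _ h1)
          · exact Or.inr h1
        · rcases h2 with h2 | h2
          · exact Or.inl (List.mem_cons_of_mem _ h2)
          · exact Or.inr h2

-- the pair-to-char collapse: on binary chars A's appended digit string is one char
theorem toChars_sc (a b : Char) (ha : a = '0' ∨ a = '1') (hb : b = '0' ∨ b = '1') :
    PySem.Int.toChars (pyIntCh a + pyIntCh b) = [sc a b] := by
  rcases ha with rfl | rfl <;> rcases hb with rfl | rfl <;> decide


-- ---- per-input abstractions (proof-side only) ----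
def bchars (c : List Char) : List Char := c.map (fun x => if x = '.' then '0' else '1')
def paddedL (c1 c2 : List Char) : List Char := List.replicate c2.length '0' ++ bchars c1
def Xrow (c1 c2 : List Char) (k : Nat) : List Char :=
  (paddedL c1 c2).take k ++
    (zipLongest ((paddedL c1 c2).drop k) (bchars c2) '0').flatMap
      (fun ab => PySem.Int.toChars (pyIntCh ab.1 + pyIntCh ab.2))
def umask (c1 c2 : List Char) (k : Nat) : Nat :=
  (mchars (bchars c1) <<< c2.length) ||| (mchars (bchars c2) <<< k)
def cmask (c1 c2 : List Char) (k : Nat) : Nat :=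
  (mchars (bchars c1) <<< c2.length) &&& (mchars (bchars c2) <<< k)

theorem Bin_bchars (c : List Char) : BinL (bchars c) := by
  intro x hx
  rcases List.mem_map.mp hx with ⟨y, _, rfl⟩
  by_cases h : y = '.' <;> simp [h]

theorem Bin_padded (c1 c2 : List Char) : BinL (paddedL c1 c2) := by
  intro x hx
  rcases List.mem_append.mp hx with h | h
  · exact Or.inl (List.eq_of_mem_replicate h)
  · exact Bin_bchars c1 x h

theorem flatMap_singleton_eq_map {α β : Type} (f : α → List β) (g : α → β) (l : List α)
    (h : ∀ x ∈ l, f x = [g x]) : l.flatMap f = l.map g := by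
  induction l with
  | nil => rfl
  | cons a t ih =>
    rw [List.flatMap_cons, List.map_cons, h a List.mem_cons_self,
      ih (fun x hx => h x (List.mem_cons_of_mem _ hx))]
    rfl

theorem Xrow_eq_map (c1 c2 : List Char) (k : Nat) :
    Xrow c1 c2 k = (paddedL c1 c2).take k ++
      (zipLongest ((paddedL c1 c2).drop k) (bchars c2) '0').map (fun ab => sc ab.1 ab.2) := by
  unfold Xrow
  congr 1
  apply flatMap_singleton_eq_map
  intro ab hab
  rcases mem_zipLongest _ _ _ _ hab with ⟨h1, h2⟩
  apply toChars_sc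
  · rcases h1 with h1 | h1
    · exact Bin_padded c1 c2 _ ((List.drop_sublist _ _).subset h1)
    · exact Or.inl h1
  · rcases h2 with h2 | h2
    · exact Bin_bchars c2 _ h2
    · exact Or.inl h2

theorem getD_padded (c1 c2 : List Char) (j : Nat) :
    (paddedL c1 c2).getD j '0' =
      if j < c2.length then '0' else (bchars c1).getD (j - c2.length) '0' := by
  unfold paddedL
  by_cases h : j < c2.length
  · rw [if_pos h]
    rw [List.getD_eq_getElem?_getD, List.getElem?_append_left (by simpa using h)]
    simp [List.getElem?_replicate, h]
  · rw [if_neg h]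
    rw [List.getD_eq_getElem?_getD, List.getElem?_append_right (by simpa using Nat.le_of_not_lt h)]
    simp [List.getD_eq_getElem?_getD]

theorem getD_beyond (l : List Char) (j : Nat) (d : Char) (h : l.length ≤ j) :
    l.getD j d = d := by
  rw [List.getD_eq_getElem?_getD, List.getElem?_eq_none (by omega)]
  rfl

theorem Bin_getD (l : List Char) (hb : BinL l) (j : Nat) :
    l.getD j '0' = '0' ∨ l.getD j '0' = '1' := by
  by_cases h : j < l.length
  · rw [List.getD_eq_getElem?_getD, List.getElem?_eq_getElem h]
    exact hb _ (List.getElem_mem h)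
  · rw [getD_beyond _ _ _ (by omega)]
    exact Or.inl rfl

theorem testBit_base (c1 c2 : List Char) (j : Nat) :
    (mchars (bchars c1) <<< c2.length).testBit j = ((paddedL c1 c2).getD j '0' == '1') := by
  rw [Nat.testBit_shiftLeft, testBit_mchars, getD_padded]
  by_cases h : j < c2.length
  · simp [h, Nat.not_le.mpr h]
  · simp [h, Nat.le_of_not_lt h]

theorem testBit_sh (c2 : List Char) (k j : Nat) :
    (mchars (bchars c2) <<< k).testBit j
      = ((if k ≤ j then (bchars c2).getD (j - k) '0' else '0') == '1') := by
  rw [Nat.testBit_shiftLeft, testBit_mchars]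
  by_cases h : k ≤ j
  · simp [h]
  · simp [h]

theorem sc_cases (a b : Char) : sc a b = '0' ∨ sc a b = '1' ∨ sc a b = '2' := by
  unfold sc
  split_ifs <;> simp

theorem sc_eq_two_iff (a b : Char) : sc a b = '2' ↔ (a = '1' ∧ b = '1') := by
  unfold sc
  split_ifs with h1 h2 h3 <;> simp_all

theorem sc_zero_right (a : Char) (h : a = '0' ∨ a = '1') : sc a '0' = a := by
  rcases h with rfl | rfl <;> decide

theorem getD_Xrow (c1 c2 : List Char) (k j : Nat) (hk : k ≤ (paddedL c1 c2).length) :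
    (Xrow c1 c2 k).getD j '0'
      = sc ((paddedL c1 c2).getD j '0')
           (if k ≤ j then (bchars c2).getD (j - k) '0' else '0') := by
  rw [Xrow_eq_map]
  have hlen : ((paddedL c1 c2).take k).length = k := by
    simpa using hk
  by_cases hj : j < k
  · rw [List.getD_eq_getElem?_getD, List.getElem?_append_left (by omega),
      List.getElem?_take, if_pos hj, ← List.getD_eq_getElem?_getD,
      if_neg (by omega)]
    exact (sc_zero_right _ (Bin_getD _ (Bin_padded c1 c2) j)).symm
  · rw [List.getD_eq_getElem?_getD, List.getElem?_append_right (by omega), hlen,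
      ← List.getD_eq_getElem?_getD]
    have hm := getD_map (fun ab : Char × Char => sc ab.1 ab.2)
      (zipLongest (List.drop k (paddedL c1 c2)) (bchars c2) '0') (j - k) ('0', '0')
    have h0 : sc ('0', '0').1 ('0', '0').2 = '0' := by decide
    rw [h0] at hm
    rw [getD_zipLongest, getD_drop] at hm
    rw [hm]
    have hkj : k + (j - k) = j := by omega
    rw [hkj, if_pos (by omega)]

theorem singleton_infix_iff {a : Char} {l : List Char} : [a] <:+: l ↔ a ∈ l := by
  constructor
  · intro h
    exact h.subset List.mem_cons_self
  · intro h
    rcases List.append_of_mem h with ⟨s, t, rfl⟩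
    exact ⟨s, t, by simp⟩

theorem key1 (c1 c2 : List Char) (k : Nat) (hk : k ≤ (paddedL c1 c2).length) :
    (PySem.Chars.isIn ['2'] (Xrow c1 c2 k) = false) ↔ cmask c1 c2 k = 0 := by
  have hmem : PySem.Chars.isIn ['2'] (Xrow c1 c2 k) = true ↔ '2' ∈ Xrow c1 c2 k := by
    rw [PySem.Chars.isIn_iff_infix, singleton_infix_iff]
  have hchain : '2' ∈ Xrow c1 c2 k ↔ cmask c1 c2 k ≠ 0 := by
    rw [mem_iff_getD _ _ '0' (by decide), nat_ne_zero_iff]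
    constructor
    · rintro ⟨j, hj⟩
      refine ⟨j, ?_⟩
      rw [getD_Xrow c1 c2 k j hk] at hj
      rw [sc_eq_two_iff] at hj
      unfold cmask
      rw [Nat.testBit_land, testBit_base, testBit_sh, hj.1, hj.2]
      rfl
    · rintro ⟨j, hj⟩
      unfold cmask at hj
      rw [Nat.testBit_land, testBit_base, testBit_sh, Bool.and_eq_true, beq_iff_eq, beq_iff_eq] at hj
      exact ⟨j, by rw [getD_Xrow c1 c2 k j hk, sc_eq_two_iff]; exact ⟨hj.1, hj.2⟩⟩
  constructor
  · intro h
    by_contra hne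
    have h2 : '2' ∈ Xrow c1 c2 k := hchain.mpr hne
    rw [← hmem, h] at h2
    exact Bool.false_ne_true h2
  · intro h
    cases hx : PySem.Chars.isIn ['2'] (Xrow c1 c2 k) with
    | false => rfl
    | true => exact absurd (hchain.mp (hmem.mp hx)) (by simp [h])

theorem Bin_Xrow (c1 c2 : List Char) (k : Nat) (hk : k ≤ (paddedL c1 c2).length)
    (h : cmask c1 c2 k = 0) : BinL (Xrow c1 c2 k) := by
  intro c hc
  rcases mem_imp_getD _ c '0' hc with ⟨j, hj⟩
  rw [getD_Xrow c1 c2 k j hk] at hj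
  rcases sc_cases ((paddedL c1 c2).getD j '0')
      (if k ≤ j then (bchars c2).getD (j - k) '0' else '0') with h0 | h1 | h2
  · exact Or.inl (hj ▸ h0)
  · exact Or.inr (hj ▸ h1)
  · exfalso
    rw [sc_eq_two_iff] at h2
    have : (cmask c1 c2 k).testBit j = true := by
      unfold cmask
      rw [Nat.testBit_land, testBit_base, testBit_sh, h2.1, h2.2]
      rfl
    rw [h, Nat.zero_testBit] at this
    exact Bool.false_ne_true this

theorem sc_eq_one (p q : Char) (hp : p = '0' ∨ p = '1') (hq : q = '0' ∨ q = '1')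
    (hno : ¬(p = '1' ∧ q = '1')) :
    ((sc p q) == '1') = ((p == '1') || (q == '1')) := by
  rcases hp with rfl | rfl <;> rcases hq with rfl | rfl <;> first | rfl | (exact absurd ⟨rfl, rfl⟩ hno)

theorem key2 (c1 c2 : List Char) (k : Nat) (hk : k ≤ (paddedL c1 c2).length)
    (h : cmask c1 c2 k = 0) : mchars (Xrow c1 c2 k) = umask c1 c2 k := by
  apply Nat.eq_of_testBit_eq
  intro j
  rw [testBit_mchars, getD_Xrow c1 c2 k j hk]
  unfold umask
  rw [Nat.testBit_lor, testBit_base, testBit_sh]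
  have hno : ¬((paddedL c1 c2).getD j '0' = '1' ∧
      (if k ≤ j then (bchars c2).getD (j - k) '0' else '0') = '1') := by
    rintro ⟨h1, h2⟩
    have : (cmask c1 c2 k).testBit j = true := by
      unfold cmask
      rw [Nat.testBit_land, testBit_base, testBit_sh, h1, h2]
      rfl
    rw [h, Nat.zero_testBit] at this
    exact Bool.false_ne_true this
  apply sc_eq_one
  · exact Bin_getD _ (Bin_padded c1 c2) j
  · by_cases hkj : k ≤ j
    · rw [if_pos hkj]
      exact Bin_getD _ (Bin_bchars c2) (j - k)
    · rw [if_neg hkj]; exact Or.inl rfl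
  · exact hno


def lenInt (s : List Char) : Int := (s.length : Int)
def aStep (c1 c2 : List Char) (r : List (List Char)) (k : Nat) : List (List Char) :=
  if PySem.Chars.isIn ['2'] (Xrow c1 c2 k) then r
  else r ++ [PySem.Chars.stripChars (Xrow c1 c2 k) ['0']]
def bStep (c1 c2 : List Char) (sp : List Int) (k : Nat) : List Int :=
  if cmask c1 c2 k ≠ 0 then sp
  else if umask c1 c2 k = 0 then sp ++ [(0 : Int)]
  else sp ++ [(PySem.Int.bitLength ((oddify (umask c1 c2 k) : Nat) : Int) : Int)]

theorem rowval (c1 c2 : List Char) (k : Nat) (hk : k ≤ (paddedL c1 c2).length)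
    (h : cmask c1 c2 k = 0) :
    lenInt (PySem.Chars.stripChars (Xrow c1 c2 k) ['0'])
      = (if umask c1 c2 k = 0 then (0 : Int)
         else (PySem.Int.bitLength ((oddify (umask c1 c2 k) : Nat) : Int) : Int)) := by
  have := strip_len (Xrow c1 c2 k) (Bin_Xrow c1 c2 k hk h)
  rw [key2 c1 c2 k hk h] at this
  exact this

theorem fold_pair (c1 c2 : List Char) (l : List Nat)
    (hl : ∀ k ∈ l, k ≤ (paddedL c1 c2).length) :
    ∀ r0 : List (List Char),
      l.foldl (bStep c1 c2) (r0.map lenInt) = (l.foldl (aStep c1 c2) r0).map lenInt := by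
  induction l with
  | nil => intro r0; rfl
  | cons k t ih =>
    intro r0
    have hk := hl k List.mem_cons_self
    have ht : ∀ k ∈ t, k ≤ (paddedL c1 c2).length :=
      fun k hk2 => hl k (List.mem_cons_of_mem _ hk2)
    rw [List.foldl_cons, List.foldl_cons]
    by_cases hc : cmask c1 c2 k = 0
    · have hisin := (key1 c1 c2 k hk).mpr hc
      have ha : aStep c1 c2 r0 k = r0 ++ [PySem.Chars.stripChars (Xrow c1 c2 k) ['0']] := by
        unfold aStep; rw [hisin]; rfl
      have hb : bStep c1 c2 (r0.map lenInt) k = (aStep c1 c2 r0 k).map lenInt := by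
        rw [ha, List.map_append]
        unfold bStep
        rw [if_neg (by simp [hc])]
        by_cases hu : umask c1 c2 k = 0
        · rw [if_pos hu]
          have hv := rowval c1 c2 k hk hc
          rw [if_pos hu] at hv
          simp [hv]
        · rw [if_neg hu]
          have hv := rowval c1 c2 k hk hc
          rw [if_neg hu] at hv
          simp [hv]
      rw [hb]
      exact ih ht (aStep c1 c2 r0 k)
    · have hisin : PySem.Chars.isIn ['2'] (Xrow c1 c2 k) = true := by
        cases hx : PySem.Chars.isIn ['2'] (Xrow c1 c2 k) with
        | false => exact absurd ((key1 c1 c2 k hk).mp hx) hc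
        | true => rfl
      have ha : aStep c1 c2 r0 k = r0 := by unfold aStep; rw [hisin]; rfl
      have hb : bStep c1 c2 (r0.map lenInt) k = r0.map lenInt := by
        unfold bStep; rw [if_pos (by simp [hc])]
      rw [ha, hb]
      exact ih ht r0

theorem aFold_prefix (c1 c2 : List Char) :
    ∀ (l : List Nat) (r0 : List (List Char)), ∃ t, l.foldl (aStep c1 c2) r0 = r0 ++ t := by
  intro l
  induction l with
  | nil => intro r0; exact ⟨[], by simp⟩
  | cons k u ih =>
    intro r0
    rw [List.foldl_cons]
    by_cases hx : PySem.Chars.isIn ['2'] (Xrow c1 c2 k) = true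
    · have ha : aStep c1 c2 r0 k = r0 := by unfold aStep; rw [hx]; rfl
      rw [ha]; exact ih r0
    · have ha : aStep c1 c2 r0 k = r0 ++ [PySem.Chars.stripChars (Xrow c1 c2 k) ['0']] := by
        unfold aStep; rw [Bool.eq_false_iff.mpr hx]; rfl
      rcases ih (r0 ++ [PySem.Chars.stripChars (Xrow c1 c2 k) ['0']]) with ⟨t, htt⟩
      exact ⟨[PySem.Chars.stripChars (Xrow c1 c2 k) ['0']] ++ t, by
        rw [ha, htt, List.append_assoc]⟩

theorem cmask_zero (c1 c2 : List Char) : cmask c1 c2 0 = 0 := by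
  apply Nat.eq_of_testBit_eq
  intro j
  rw [Nat.zero_testBit]
  unfold cmask
  rw [Nat.testBit_land, testBit_base, testBit_sh]
  by_cases h : j < c2.length
  · rw [getD_padded, if_pos h]
    simp
  · have h2 : (bchars c2).getD (j - 0) '0' = '0' := by
      apply getD_beyond
      unfold bchars
      rw [List.length_map]
      omega
    rw [if_pos (Nat.zero_le j), h2]
    simp

theorem aFold_nonempty (c1 c2 : List Char) (l : List Nat) (h0 : (0 : Nat) ∈ l) :
    l.foldl (aStep c1 c2) [] ≠ [] := by
  rcases List.append_of_mem h0 with ⟨l1, l2, rfl⟩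
  rw [List.foldl_append, List.foldl_cons]
  have hisin := (key1 c1 c2 0 (Nat.zero_le _)).mpr (cmask_zero c1 c2)
  have ha : aStep c1 c2 (l1.foldl (aStep c1 c2) []) 0
      = l1.foldl (aStep c1 c2) [] ++ [PySem.Chars.stripChars (Xrow c1 c2 0) ['0']] := by
    unfold aStep; rw [hisin]; rfl
  rw [ha]
  rcases aFold_prefix c1 c2 l2
      (l1.foldl (aStep c1 c2) [] ++ [PySem.Chars.stripChars (Xrow c1 c2 0) ['0']]) with ⟨t, ht⟩
  rw [ht]
  simp

theorem final_eq (r : List (List Char)) (hr : r ≠ []) :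
    PySem.List.len
        (PySem.List.pyGetD (PySem.List.sorted r (fun s => PySem.List.len s) false) 0 [])
      = (PySem.List.min? (r.map lenInt) (fun v => v)).getD 0 := by
  obtain ⟨m, t, hsort⟩ :
      ∃ m t, PySem.List.sorted r (fun s => PySem.List.len s) false = m :: t := by
    cases hs : PySem.List.sorted r (fun s => PySem.List.len s) false with
    | nil => exact absurd ((PySem.List.sorted_eq_nil_iff _ _ _).mp hs) hr
    | cons m t => exact ⟨m, t, rfl⟩
  rw [hsort, PySem.List.pyGetD_zero_cons]
  have hmap_ne : r.map lenInt ≠ [] := by simpa using hr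
  cases hv : PySem.List.min? (r.map lenInt) (fun v => v) with
  | none => exact absurd ((PySem.List.min?_eq_none_iff _ _).mp hv) hmap_ne
  | some v =>
    rcases List.mem_map.mp (PySem.List.min?_mem hv) with ⟨y, hy, rfl⟩
    have hmin := PySem.List.min?_isMin hv
    have hm_mem : m ∈ r := (PySem.List.mem_sorted r _ false m).mp (hsort ▸ List.mem_cons_self)
    have h1 : PySem.List.len m ≤ lenInt y :=
      by simpa [lenInt, PySem.List.len_eq] using
        PySem.List.key_head_sorted_le r (fun s => PySem.List.len s) hsort y hy
    have h2 : lenInt y ≤ PySem.List.len m := by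
      have := hmin (lenInt m) (List.mem_map_of_mem hm_mem)
      simpa [lenInt, PySem.List.len_eq] using this
    have : PySem.List.len m = lenInt y := le_antisymm h1 h2
    rw [this]
    rfl


-- ---- normalizing the two ports into the aStep/bStep folds ----
theorem bchars_def (c : List Char) :
    c.map (fun x => if x = '.' then '0' else '1') = bchars c := rfl

theorem length_bchars (c : List Char) : (bchars c).length = c.length := by
  unfold bchars; exact List.length_map ..

theorem length_paddedL (c1 c2 : List Char) :
    (paddedL c1 c2).length = c2.length + c1.length := by
  unfold paddedL
  rw [List.length_append, List.length_replicate, length_bchars]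

theorem paddedL_def (c1 c2 : List Char) :
    List.replicate c2.length '0' ++ bchars c1 = paddedL c1 c2 := rfl

theorem Xrow_def (c1 c2 : List Char) (k : Nat) :
    (paddedL c1 c2).take k ++
      (zipLongest ((paddedL c1 c2).drop k) (bchars c2) '0').flatMap
        (fun ab => PySem.Int.toChars (pyIntCh ab.1 + pyIntCh ab.2)) = Xrow c1 c2 k := rfl

set_option maxHeartbeats 1000000 in
theorem solutionA_eq (comb1 comb2 : String) :
    solution comb1 comb2 =
      PySem.List.len (PySem.List.pyGetD
        (PySem.List.sorted
          ((List.range (paddedL comb1.toList comb2.toList).length).foldl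
            (aStep comb1.toList comb2.toList) [])
          (fun s => PySem.List.len s) false) 0 []) := by
  unfold solution
  simp only [bchars_def, length_bchars, paddedL_def, PySem.List.len_eq,
    PySem.List.pyRange_one, Int.sub_zero, Int.toNat_natCast, List.foldl_map]
  congr 1
  congr 1
  congr 1
  congr 1
  apply PySem.List.foldl_congr_mem
  intro r k _
  simp only [zero_add, PySem.List.slice_to_natCast, PySem.List.slice_from_natCast,
    PySem.List.foldl_append_eq_flatMap, Xrow_def]
  rfl

theorem cmask_def (c1 c2 : List Char) (k : Nat) :
    (mchars (bchars c1) <<< c2.length) &&& (mchars (bchars c2) <<< k) = cmask c1 c2 k := rfl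

theorem umask_def (c1 c2 : List Char) (k : Nat) :
    (mchars (bchars c1) <<< c2.length) ||| (mchars (bchars c2) <<< k) = umask c1 c2 k := rfl

set_option maxHeartbeats 1000000 in
theorem solutionB_eq (comb1 comb2 : String) :
    solution_alt comb1 comb2 =
      (PySem.List.min?
        ((List.range (paddedL comb1.toList comb2.toList).length).foldl
          (bStep comb1.toList comb2.toList) []) (fun v => v)).getD 0 := by
  unfold solution_alt
  simp only [← mchars_map_teeth, bchars_def, PySem.List.len_eq]
  have hlen : ((comb1.toList.length : Int) + (comb2.toList.length : Int) - 0).toNat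
      = (paddedL comb1.toList comb2.toList).length := by
    rw [length_paddedL]; omega
  rw [PySem.List.pyRange_one, hlen, List.foldl_map]
  congr 1
  congr 1
  apply PySem.List.foldl_congr_mem
  intro sp k _
  simp only [zero_add, Int.toNat_natCast, cmask_def, umask_def]
  rfl

-- ===== VERDICT (by name: the statement is the Claim_ definition above) =====
-- ===== VERDICT (by name: the statement is the Claim_ definition above) =====
theorem solution_spec : Claim_equal_solution := by
  unfold Claim_equal_solution
  intro comb1 comb2 _ hpre
  unfold Spec_solution
  rw [solutionA_eq, solutionB_eq]
  have hl : ∀ k ∈ List.range (paddedL comb1.toList comb2.toList).length,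
      k ≤ (paddedL comb1.toList comb2.toList).length :=
    fun k hk => le_of_lt (List.mem_range.mp hk)
  have hfold := fold_pair comb1.toList comb2.toList
    (List.range (paddedL comb1.toList comb2.toList).length) hl []
  simp only [List.map_nil] at hfold
  rw [hfold]
  apply final_eq
  apply aFold_nonempty
  rw [List.mem_range, length_paddedL]
  unfold Pre_solution at hpre
  rcases Decidable.not_and_iff_not_or_not.mp hpre with h | h
  · have : comb1.toList ≠ [] := fun hnil => h (String.toList_inj.mp (by simp [hnil]))
    have := List.length_pos_of_ne_nil this
    omega
  · have : comb2.toList ≠ [] := fun hnil => h (String.toList_inj.mp (by simp [hnil]))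
    have := List.length_pos_of_ne_nil this
    omega
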